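-- pv_equiv track=rewrite | github.com/YoruCathy/cs6120-tasks | lesson5/run_on_bril.py | block_index_of_pos
-- ===== SOURCE A (Python) =====
-- from typing import Dict, List, Optional
--
-- def block_index_of_pos(leaders_list: List[int], instrs: List[Dict], pos: int) -> Optional[int]:
--     for i, L in enumerate(leaders_list):
--         if i + 1 < len(leaders_list):
--             if L <= pos < leaders_list[i + 1]:
--                 return i
--         else:
--             if L <= pos < len(instrs):
--                 return i
--     return None
-- ===== SOURCE B (Python) =====
-- def block_index_of_pos(leaders_list, instrs, pos):
--     # Binary search for the rightmost insertion point of pos among the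
--     # (sorted) leaders, instead of A's linear scan.
--     lo, hi = 0, len(leaders_list)
--     while lo < hi:
--         mid = (lo + hi) // 2
--         if pos < leaders_list[mid]:
--             hi = mid
--         else:
--             lo = mid + 1
--     i = lo - 1
--     if i < 0:
--         return None
--     if i == len(leaders_list) - 1 and pos >= len(instrs):
--         return None
--     return i
-- ===== Notes on version B (the rewrite author's own statement) =====
-- stated objective: faster
-- what changed: Replaces the linear scan over leaders with a binary search for the rightmost insertion point of pos, then one bounds check; valid because block leaders are sorted ascending (stated in Pre_).
-- outside the precondition, e.g. on block_index_of_pos([0, 0, -1], [], -1): A returns 2, B returns None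
import Mathlib
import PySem

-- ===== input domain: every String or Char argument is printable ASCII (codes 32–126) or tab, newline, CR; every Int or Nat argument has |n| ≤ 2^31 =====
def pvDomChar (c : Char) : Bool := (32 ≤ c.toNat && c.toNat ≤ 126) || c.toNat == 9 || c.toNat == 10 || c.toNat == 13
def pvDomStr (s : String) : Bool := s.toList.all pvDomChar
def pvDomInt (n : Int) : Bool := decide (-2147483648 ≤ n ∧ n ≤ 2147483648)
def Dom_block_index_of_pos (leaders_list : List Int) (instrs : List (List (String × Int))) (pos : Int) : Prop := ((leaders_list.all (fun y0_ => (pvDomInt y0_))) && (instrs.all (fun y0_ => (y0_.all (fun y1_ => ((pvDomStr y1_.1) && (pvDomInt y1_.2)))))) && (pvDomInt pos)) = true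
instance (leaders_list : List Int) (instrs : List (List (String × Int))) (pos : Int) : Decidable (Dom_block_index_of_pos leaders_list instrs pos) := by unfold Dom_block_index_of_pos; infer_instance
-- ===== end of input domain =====

-- B replaces A's linear scan over the leaders with a binary search for the
-- rightmost insertion point of pos (faster); requires leaders_list sorted ascending (Pre_).

-- ===== PORT A =====
-- the for-loop over enumerate(leaders_list): i is the running index, the
-- 'i + 1 < len(leaders_list)' branch is the 'rest nonempty' case
def pvALoop (pos : Int) (nI : Int) : Int → List Int → Option Int
  | i, L :: next :: rest =>
      if L ≤ pos ∧ pos < next then some i else pvALoop pos nI (i + 1) (next :: rest)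
  | i, [L] => if L ≤ pos ∧ pos < nI then some i else none
  | _, [] => none

def block_index_of_pos (leaders_list : List Int) (instrs : List (List (String × Int))) (pos : Int) : Option Int :=
  pvALoop pos (instrs.length : Int) 0 leaders_list

-- ===== PORT B =====
-- the while lo < hi binary-search loop; leaders_list[mid] is in range (lo ≤ mid < hi ≤ len), so getD is exact
-- fuel = hi - lo only makes the halving loop structurally total; each step
-- shrinks hi - lo by at least 1, so the fuel never runs out mid-loop
def pvBsrGo (a : List Int) (x : Int) : Nat → Nat → Nat → Nat
  | 0, lo, _ => lo
  | fuel + 1, lo, hi =>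
    if lo < hi then
      let mid := (lo + hi) / 2
      if x < a.getD mid 0 then pvBsrGo a x fuel lo mid
      else pvBsrGo a x fuel (mid + 1) hi
    else lo

def pvBsr (a : List Int) (x : Int) (lo hi : Nat) : Nat := pvBsrGo a x (hi - lo) lo hi

def block_index_of_pos_alt (leaders_list : List Int) (instrs : List (List (String × Int))) (pos : Int) : Option Int :=
  let i : Int := (pvBsr leaders_list pos 0 leaders_list.length : Int) - 1
  if i < 0 then none
  else if i = (leaders_list.length : Int) - 1 ∧ pos ≥ (instrs.length : Int) then none
  else some i

-- ===== PRECONDITION & SPEC =====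
-- Pre_ excludes leaders lists that are not sorted nondecreasing: on those A still
-- returns (the first interval hit by the scan), but binary search is only
-- meaningful on sorted leaders — in the source program leaders are block
-- boundaries produced in increasing order.
def Pre_block_index_of_pos (leaders_list : List Int) (instrs : List (List (String × Int))) (pos : Int) : Prop :=
  List.Pairwise (fun a b => a ≤ b) leaders_list
instance (leaders_list : List Int) (instrs : List (List (String × Int))) (pos : Int) : Decidable (Pre_block_index_of_pos leaders_list instrs pos) := by unfold Pre_block_index_of_pos; infer_instance

def pvWitness_block_index_of_pos : List Int × (List (List (String × Int))) × Int := ([0, 2, 5], [[("op", 1)], [], [], [], [], []], 3)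

def Spec_block_index_of_pos (leaders_list : List Int) (instrs : List (List (String × Int))) (pos : Int) (out : Option Int) : Prop := out = block_index_of_pos_alt leaders_list instrs pos
instance (leaders_list : List Int) (instrs : List (List (String × Int))) (pos : Int) (out : Option Int) : Decidable (Spec_block_index_of_pos leaders_list instrs pos out) := by unfold Spec_block_index_of_pos; infer_instance

-- ===== CLAIM (what is proved, stated in full; the proofs are below) =====
def Claim_equal_block_index_of_pos : Prop := ∀ (leaders_list : List Int) (instrs : List (List (String × Int))) (pos : Int), Dom_block_index_of_pos leaders_list instrs pos → Pre_block_index_of_pos leaders_list instrs pos → Spec_block_index_of_pos leaders_list instrs pos (block_index_of_pos leaders_list instrs pos)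

-- ===== LEMMAS AND PROOFS =====

lemma countP_zero_of_sorted_head (L : Int) (rest : List Int) (pos : Int)
    (hs : List.Pairwise (fun a b => a ≤ b) (L :: rest)) (h : pos < L) :
    (L :: rest).countP (fun x => decide (x ≤ pos)) = 0 := by
  rw [List.countP_eq_zero]
  intro a ha
  simp only [List.mem_cons] at ha
  rcases ha with rfl | ha
  · simpa using not_le.mpr h
  · have := (List.pairwise_cons.mp hs).1 a ha
    simpa using not_le.mpr (lt_of_lt_of_le h this)

lemma pvALoop_eq (pos nI : Int) (l : List Int) :
    ∀ i : Int, List.Pairwise (fun a b => a ≤ b) l →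
    pvALoop pos nI i l =
      (if l.countP (fun L => decide (L ≤ pos)) = 0 then none
       else if l.countP (fun L => decide (L ≤ pos)) = l.length ∧ nI ≤ pos then none
       else some (i + (l.countP (fun L => decide (L ≤ pos)) : Int) - 1)) := by
  induction l with
  | nil => intro i _; simp [pvALoop]
  | cons L rest ih =>
    intro i hs
    have hs' : List.Pairwise (fun a b => a ≤ b) rest := (List.pairwise_cons.mp hs).2
    match rest with
    | [] =>
      by_cases hL : L ≤ pos
      · by_cases hI : nI ≤ pos
        · have hn : ¬ pos < nI := not_lt.mpr hI
          simp [pvALoop, hL, hn, hI, List.countP_cons]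
        · have hn : pos < nI := not_le.mp hI
          simp [pvALoop, hL, hn, hI, List.countP_cons]
      · simp [pvALoop, hL, List.countP_cons]
    | next :: rest' =>
      by_cases hL : L ≤ pos
      · by_cases hn : pos < next
        · have hz : (next :: rest').countP (fun x => decide (x ≤ pos)) = 0 :=
            countP_zero_of_sorted_head next rest' pos hs' hn
          simp [pvALoop, hL, hn, List.countP_cons, hz]
        · have hrec := ih (i + 1) hs'
          have hk1 : 0 < (next :: rest').countP (fun x => decide (x ≤ pos)) :=
            List.countP_pos_iff.mpr ⟨next, List.mem_cons_self, by simpa using not_lt.mp hn⟩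
          have hcnt : (L :: next :: rest').countP (fun x => decide (x ≤ pos))
              = (next :: rest').countP (fun x => decide (x ≤ pos)) + 1 := by
            simp [List.countP_cons, hL]
          simp only [pvALoop, hL, hn, and_false, if_false]
          rw [hrec, hcnt]
          simp only [List.length_cons]
          generalize (next :: rest').countP (fun x => decide (x ≤ pos)) = k' at hk1 ⊢
          rw [if_neg (show ¬ (k' = 0) by omega), if_neg (show ¬ (k' + 1 = 0) by omega)]
          by_cases hc : nI ≤ pos
          · by_cases hf : k' = rest'.length + 1
            · rw [if_pos ⟨hf, hc⟩, if_pos ⟨by omega, hc⟩]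
            · rw [if_neg (fun h => hf h.1), if_neg (fun h => hf (by omega))]
              simp only [Option.some.injEq]
              omega
          · rw [if_neg (fun h => hc h.2), if_neg (fun h => hc h.2)]
            simp only [Option.some.injEq]
            omega
      · have hz : (L :: next :: rest').countP (fun x => decide (x ≤ pos)) = 0 :=
          countP_zero_of_sorted_head L (next :: rest') pos hs (not_le.mp hL)
        have hz' : (next :: rest').countP (fun x => decide (x ≤ pos)) = 0 := by
          simp only [List.countP_cons] at hz ⊢
          omega
        have hrec := ih (i + 1) hs'
        simp [pvALoop, hL, hrec, hz, hz']

lemma countP_of_split (x : Int) (a : List Int) :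
    ∀ k : Nat, k ≤ a.length →
    (∀ j : Nat, j < a.length → (j < k ↔ a.getD j 0 ≤ x)) →
    a.countP (fun L => decide (L ≤ x)) = k := by
  induction a with
  | nil => intro k hk _; simp at hk ⊢; omega
  | cons b t ih =>
    intro k hk hsplit
    match k with
    | 0 =>
      have hb : ¬ b ≤ x := by
        intro h
        have := (hsplit 0 (by simp)).2 (by simpa using h)
        omega
      have ht : t.countP (fun L => decide (L ≤ x)) = 0 := by
        rw [List.countP_eq_zero]
        intro a ha
        obtain ⟨j, hj, rfl⟩ := List.getElem_of_mem ha
        simp only [decide_eq_true_eq]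
        intro hle
        have hgd : (b :: t).getD (j + 1) 0 ≤ x := by
          rw [List.getD_cons_succ, List.getD_eq_getElem _ _ hj]
          exact hle
        have := (hsplit (j + 1) (by simp; omega)).2 hgd
        omega
      simp [List.countP_cons, ht, hb]
    | k' + 1 =>
      have hb : b ≤ x := by
        have := (hsplit 0 (by simp)).1 (by omega)
        simpa using this
      have ht : t.countP (fun L => decide (L ≤ x)) = k' := by
        apply ih k' (by simp at hk; omega)
        intro j hj
        have := hsplit (j + 1) (by simp; omega)
        simpa [List.getD_cons_succ, Nat.succ_lt_succ_iff] using this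
      simp [List.countP_cons, ht, hb]

lemma pvBsr_eq_aux (a : List Int) (x : Int)
    (hs : List.Pairwise (fun p q => p ≤ q) a) :
    ∀ fuel lo hi : Nat, hi - lo ≤ fuel → lo ≤ hi → hi ≤ a.length →
    (∀ j : Nat, j < lo → a.getD j 0 ≤ x) →
    (∀ j : Nat, hi ≤ j → j < a.length → x < a.getD j 0) →
    pvBsrGo a x fuel lo hi = a.countP (fun L => decide (L ≤ x)) := by
  have hmono : ∀ i j : Nat, i ≤ j → j < a.length → a.getD i 0 ≤ a.getD j 0 := by
    intro i j hij hj
    rcases Nat.eq_or_lt_of_le hij with rfl | hlt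
    · exact le_refl _
    · have hi : i < a.length := lt_trans hlt hj
      rw [List.getD_eq_getElem _ _ hi, List.getD_eq_getElem _ _ hj]
      exact List.pairwise_iff_getElem.mp hs i j hi hj hlt
  intro fuel
  induction fuel with
  | zero =>
    intro lo hi hf hlh hhl hlow hhigh
    have : lo = hi := by omega
    subst this
    simp only [pvBsrGo]
    exact (countP_of_split x a lo hhl
      (fun j hj => ⟨fun hjlo => hlow j hjlo,
        fun hle => by
          by_contra hc
          exact absurd hle (not_le.mpr (hhigh j (by omega) hj))⟩)).symm
  | succ n ih =>
    intro lo hi hf hlh hhl hlow hhigh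
    simp only [pvBsrGo]
    by_cases h : lo < hi
    · simp only [h, if_true]
      by_cases hx : x < a.getD ((lo + hi) / 2) 0
      · simp only [hx, if_true]
        exact ih lo ((lo + hi) / 2) (by omega) (by omega) (by omega) hlow
          (fun j hj hjl => lt_of_lt_of_le hx (hmono ((lo + hi) / 2) j hj hjl))
      · simp only [hx, if_false]
        refine ih ((lo + hi) / 2 + 1) hi (by omega) (by omega) hhl ?_ hhigh
        intro j hj
        have hj' : j ≤ (lo + hi) / 2 := by omega
        have hmid : (lo + hi) / 2 < a.length := by omega
        exact le_trans (hmono j ((lo + hi) / 2) hj' hmid) (not_lt.mp hx)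
    · simp only [h, if_false]
      have : lo = hi := by omega
      subst this
      exact (countP_of_split x a lo hhl
        (fun j hj => ⟨fun hjlo => hlow j hjlo,
          fun hle => by
            by_contra hc
            exact absurd hle (not_le.mpr (hhigh j (by omega) hj))⟩)).symm

-- ===== VERDICT =====
theorem block_index_of_pos_spec : Claim_equal_block_index_of_pos := by
  intro leaders_list instrs pos _ hpre
  unfold Spec_block_index_of_pos block_index_of_pos block_index_of_pos_alt
  have hA := pvALoop_eq pos (instrs.length : Int) leaders_list 0 hpre
  have hB : pvBsr leaders_list pos 0 leaders_list.length
      = leaders_list.countP (fun L => decide (L ≤ pos)) := by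
    unfold pvBsr
    exact pvBsr_eq_aux leaders_list pos hpre (leaders_list.length - 0) 0 leaders_list.length
      (by omega) (by omega) (le_refl _)
      (fun j hj => absurd hj (by omega)) (fun j hj hjl => absurd hjl (by omega))
  rw [hA, hB]
  set k := leaders_list.countP (fun L => decide (L ≤ pos)) with hk
  have hkle : k ≤ leaders_list.length := List.countP_le_length
  by_cases hk0 : k = 0
  · simp [hk0]
  · have h0 : ¬ ((k : Int) - 1 < 0) := by omega
    simp only [hk0, if_false, h0]
    have heq : ((k : Int) - 1 = (leaders_list.length : Int) - 1) ↔ (k = leaders_list.length) := by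
      omega
    by_cases hfull : k = leaders_list.length
    · by_cases hI : (instrs.length : Int) ≤ pos
      · simp [hfull, hI, heq, ge_iff_le]
      · simp [hfull, hI, heq, ge_iff_le]
    · simp only [heq, hfull, false_and, if_false]
      simp [hfull, heq]
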